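-- pv_equiv track=rewrite | github.com/vishalmishra27/BSS-Tool | inspiration flask-api/engines/QualityComparison.py | _normalize_sample_id
-- ===== SOURCE A (Python) =====
-- def _normalize_sample_id(sid: str) -> str:
--     """Normalize sample IDs for matching: strip prefixes, lowercase."""
--     s = sid.strip().lower()
--     # Strip common prefixes
--     for prefix in ("sample-", "sample_", "sample ", "s-", "s_", "s"):
--         if s.startswith(prefix) and len(s) > len(prefix):
--             rest = s[len(prefix):]
--             if rest[0:1].isdigit():
--                 s = rest
--                 break
--     return s
-- ===== SOURCE B (Python) =====
-- def _normalize_sample_id(sid: str) -> str: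
--     """Normalize sample IDs for matching: strip prefixes, lowercase."""
--     s = sid.strip().lower()
--     if s[:6] == "sample" and len(s) >= 8 and s[6] in "-_ " and s[7].isdigit():
--         return s[7:]
--     if len(s) >= 3 and s[0] == "s" and s[1] in "-_" and s[2].isdigit():
--         return s[2:]
--     if len(s) >= 2 and s[0] == "s" and s[1].isdigit():
--         return s[1:]
--     return s
-- ===== Notes on version B (the rewrite author's own statement) =====
-- stated objective: simpler
-- what changed: A's for-loop over a 6-element prefix tuple (with slicing and a digit test inside the loop, plus break) is replaced by a three-branch early-return chain of direct index tests: full word prefix plus separator plus digit, single letter plus separator plus digit, single letter plus digit.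
import Mathlib
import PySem

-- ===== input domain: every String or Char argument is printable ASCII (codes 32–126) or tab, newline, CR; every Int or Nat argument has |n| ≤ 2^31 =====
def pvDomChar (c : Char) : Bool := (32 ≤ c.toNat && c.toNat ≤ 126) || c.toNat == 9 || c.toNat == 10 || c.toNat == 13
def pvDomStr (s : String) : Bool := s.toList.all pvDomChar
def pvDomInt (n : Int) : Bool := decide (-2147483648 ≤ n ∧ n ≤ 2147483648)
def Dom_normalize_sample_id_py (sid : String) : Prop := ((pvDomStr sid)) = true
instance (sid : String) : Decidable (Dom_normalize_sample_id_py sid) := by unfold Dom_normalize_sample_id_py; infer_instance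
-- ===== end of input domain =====

-- B replaces A's loop over a prefix tuple (slice + digit test inside the loop) by a
-- three-branch early-return chain of direct index tests; objective: simpler, same cost.

-- ===== PORT A =====
-- A's for-loop over the prefix tuple, with break; the loop state is the current s.
def pvALoop : List (List Char) → List Char → List Char
  | [], s => s
  | p :: ps, s =>
    if PySem.Chars.startswith s p = true ∧ s.length > p.length then
      let rest := PySem.List.slice s (some (p.length : Int)) none        -- s[len(prefix):]
      if PySem.Chars.strIsdigit (PySem.List.slice rest (some 0) (some 1)) = true then  -- rest[0:1].isdigit()
        rest                                                             -- s = rest; break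
      else pvALoop ps s
    else pvALoop ps s

def normalize_sample_id_py (sid : String) : String :=
  let s := PySem.Chars.lower (PySem.Chars.strip sid.toList)              -- sid.strip().lower()
  String.ofList (pvALoop ["sample-".toList, "sample_".toList, "sample ".toList,
                          "s-".toList, "s_".toList, "s".toList] s)

-- ===== PORT B =====
-- B's early-return chain of direct index tests.
def pvBCore (s : List Char) : List Char :=
  if s.take 6 = "sample".toList ∧ s.length ≥ 8 ∧ s.getD 6 ' ' ∈ ['-', '_', ' ']
       ∧ PySem.Chars.isdigit (s.getD 7 ' ') = true then
    s.drop 7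
  else if s.length ≥ 3 ∧ s.getD 0 ' ' = 's' ∧ s.getD 1 ' ' ∈ ['-', '_']
       ∧ PySem.Chars.isdigit (s.getD 2 ' ') = true then
    s.drop 2
  else if s.length ≥ 2 ∧ s.getD 0 ' ' = 's' ∧ PySem.Chars.isdigit (s.getD 1 ' ') = true then
    s.drop 1
  else s

def normalize_sample_id_py_alt (sid : String) : String :=
  String.ofList (pvBCore (PySem.Chars.lower (PySem.Chars.strip sid.toList)))

-- ===== PRECONDITION & SPEC =====
def Spec_normalize_sample_id_py (sid : String) (out : String) : Prop := out = normalize_sample_id_py_alt sid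
instance (sid : String) (out : String) : Decidable (Spec_normalize_sample_id_py sid out) := by unfold Spec_normalize_sample_id_py; infer_instance

-- ===== CLAIM (what is proved, stated in full; the proofs are below) =====
def Claim_equal_normalize_sample_id_py : Prop := ∀ (sid : String), Dom_normalize_sample_id_py sid → Spec_normalize_sample_id_py sid (normalize_sample_id_py sid)

-- ===== LEMMAS AND PROOFS =====
-- Core equivalence: A's prefix loop equals B's branch chain on every char list.
set_option maxHeartbeats 4000000 in
theorem pv_core_eq (s : List Char) :
    pvALoop ["sample-".toList, "sample_".toList, "sample ".toList,
             "s-".toList, "s_".toList, "s".toList] s = pvBCore s := by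
  rcases s with _ | ⟨c0, _ | ⟨c1, _ | ⟨c2, _ | ⟨c3, _ | ⟨c4, _ | ⟨c5, _ | ⟨c6, _ | ⟨c7, t⟩⟩⟩⟩⟩⟩⟩⟩
  · rfl
  · simp [pvALoop, pvBCore, PySem.Chars.startswith, List.isPrefixOf]
  · simp [pvALoop, pvBCore, PySem.Chars.startswith, List.isPrefixOf, PySem.Chars.strIsdigit,
          PySem.List.slice, PySem.Chars.isdigit]
    split_ifs <;> simp_all [eq_comm]
  · simp [pvALoop, pvBCore, PySem.Chars.startswith, List.isPrefixOf, PySem.Chars.strIsdigit,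
          PySem.List.slice, PySem.Chars.isdigit]
    split_ifs <;> simp_all [eq_comm]
  · simp [pvALoop, pvBCore, PySem.Chars.startswith, List.isPrefixOf, PySem.Chars.strIsdigit,
          PySem.List.slice, PySem.Chars.isdigit]
    split_ifs <;> simp_all [eq_comm]
  · simp [pvALoop, pvBCore, PySem.Chars.startswith, List.isPrefixOf, PySem.Chars.strIsdigit,
          PySem.List.slice, PySem.Chars.isdigit]
    split_ifs <;> simp_all [eq_comm]
  · simp [pvALoop, pvBCore, PySem.Chars.startswith, List.isPrefixOf, PySem.Chars.strIsdigit,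
          PySem.List.slice, PySem.Chars.isdigit]
    split_ifs <;> simp_all [eq_comm]
  · simp [pvALoop, pvBCore, PySem.Chars.startswith, List.isPrefixOf, PySem.Chars.strIsdigit,
          PySem.List.slice, PySem.Chars.isdigit]
    split_ifs <;> simp_all [eq_comm]
  · -- length ≥ 8
    simp [pvALoop, pvBCore, PySem.Chars.startswith, List.isPrefixOf, PySem.Chars.strIsdigit,
          PySem.List.slice, PySem.Chars.isdigit]
    by_cases h0 : c0 = 's'
    · subst h0
      by_cases hp : c1 = 'a' ∧ c2 = 'm' ∧ c3 = 'p' ∧ c4 = 'l' ∧ c5 = 'e'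
      · obtain ⟨h1, h2, h3, h4, h5⟩ := hp
        subst h1 h2 h3 h4 h5
        simp
        split_ifs <;> simp_all [eq_comm]
      · repeat rw [if_neg (by tauto)]
        split_ifs <;> simp_all [eq_comm]
    · repeat rw [if_neg (by tauto)]

-- ===== VERDICT (by name: the statement is the Claim_ definition above) =====
theorem normalize_sample_id_py_spec : Claim_equal_normalize_sample_id_py := by
  intro sid _
  unfold Spec_normalize_sample_id_py normalize_sample_id_py normalize_sample_id_py_alt
  exact congrArg String.ofList (pv_core_eq _)
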